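-- pv_equiv track=rewrite | github.com/Abyss1213/Crypto-Experiment | 数论基础/GFexEuclid.py | GFexEuclid
-- ===== SOURCE A (Python) =====
-- def addorminus(a1,a2):
--     add = a1 ^ a2
--     res = add
--     return res
--
-- def gmul(a,poly):
--     a <<= 1
--     if a & 0x100 == 0x100:
--         a ^= poly
--     return a & 0xff
--
-- def multiply(a1,a2,poly):
--     result = 0
--     while(a2 > 0):
--         if a2 & 1:  # 如果a2最低位为1
--             result ^= a1
--         a1 = gmul(a1,poly)
--         a2 >>= 1
--     res = result
--     return res
--
-- def divide(a1,a2):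
--     len1 = len(bin(a1)) - 2
--     len2 = len(bin(a2)) - 2
--     len0 = len1 - len2 + 1
--     if len0 < 1:   # 被除数位数小于除数
--         return 0
--     if len0 == 1:  # 被除数位数等于除数
--         return 1
--     if len0 > 1:   # 被除数位数大于除数
--         if a2 == 1:
--             return a1
--         else:
--             div = 0
--             while(len1 >= len2):
--                 a1 ^= (a2 << (len1 - len2))
--                 div ^= (1 << (len1 - len2))
--                 len1 = len(bin(a1)) - 2
--             res = div
--             return res
--     return -1
--
-- def remainder(a1,a2,poly):
--     div = divide(a1,a2)
--     if div == 1: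
--         r = addorminus(a1,a2)
--     else:
--         temp = multiply(a2,div,poly)
--         r = addorminus(a1,temp)
--     return r
--
-- def GFexEuclid(a, b):
--     if b == 0:
--         return(a, 1, 0)
--     else:
--         g,xt,yt = GFexEuclid(b, remainder(a,b,poly))
--         x = yt
--         temp1 = divide(a, b)
--         temp2 = multiply(yt,temp1,poly)
--         y = addorminus(xt, temp2)
--         return(g,x,y)
--
-- poly = int('0x11b',16)
-- ===== SOURCE B (Python) =====
-- poly = int('0x11b',16)
--
-- def _xtime(a, poly):
--     # multiply by x in GF(2^8)
--     a <<= 1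
--     if a & 0x100:
--         a ^= poly
--     return a & 0xff
--
-- def _mul(a, b, poly):
--     # GF(2^8) product, recursing on b's bits (no running accumulator)
--     if b == 0:
--         return 0
--     low = a if b & 1 else 0
--     return low ^ _mul(_xtime(a, poly), b >> 1, poly)
--
-- def _div(a, b):
--     # carry-less polynomial quotient, one uniform loop on bit lengths
--     q = 0
--     while b.bit_length() <= a.bit_length():
--         s = a.bit_length() - b.bit_length()
--         a ^= b << s
--         q ^= 1 << s
--     return q
--
-- def GFexEuclid(a, b):
--     # iterative: phase 1 collects the quotients while reducing (r0, r1),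
--     # computing each remainder as r0 ^ mul(r1, q) (one division per step);
--     # phase 2 replays the quotients back-to-front to build the coefficients.
--     qs, r0, r1 = [], a, b
--     while r1 != 0:
--         q = _div(r0, r1)
--         qs.append(q)
--         r0, r1 = r1, r0 ^ _mul(r1, q, poly)
--     x, y = 1, 0
--     for q in reversed(qs):
--         x, y = y, x ^ _mul(y, q, poly)
--     return (r0, x, y)
-- ===== Notes on version B (the rewrite author's own statement) =====
-- stated objective: alternative
-- what changed: Replaced A's recursion (which runs divide twice per level and rebuilds the remainder via multiply inside a separate helper) by a two-phase iteration -- one loop collects each step's carry-less quotient from a single uniform bit-length loop and computes the remainder inline as r0 ^ mul(r1,q), then a backwards pass over the quotient list rebuilds the coefficients -- with restructured helpers (direct recursion on the multiplier's bits instead of an accumulator loop, one uniform quotient loop instead of A's four-branch divide).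
-- intended difference: On (0,1) A's divide(0,1)=1 (len(bin(0)) counts 0 as one binary digit) makes A return the Bezout triple (1,1,1); B returns the canonical (1,0,1); both satisfy 0*x ^ 1*y = 1 and B's is the standard extended-Euclid value. — e.g. on GFexEuclid(0, 1): A returns (1, 1, 1), B returns (1, 0, 1)
-- outside the precondition, e.g. on GFexEuclid(256, 256): A returns (256, 0, 1), B returns (256, 0, 1)
import Mathlib
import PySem

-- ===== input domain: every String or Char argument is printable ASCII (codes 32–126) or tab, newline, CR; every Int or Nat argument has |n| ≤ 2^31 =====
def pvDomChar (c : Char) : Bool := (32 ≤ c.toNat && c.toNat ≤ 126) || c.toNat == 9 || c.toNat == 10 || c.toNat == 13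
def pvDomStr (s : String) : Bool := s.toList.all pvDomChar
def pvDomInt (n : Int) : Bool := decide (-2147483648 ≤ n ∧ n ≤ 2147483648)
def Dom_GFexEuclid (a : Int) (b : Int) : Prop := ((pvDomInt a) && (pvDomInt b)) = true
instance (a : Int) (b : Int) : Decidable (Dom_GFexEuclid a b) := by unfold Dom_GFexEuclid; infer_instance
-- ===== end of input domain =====

-- B replaces A's recursion (which calls divide twice per level and multiplies the quotient back
-- for the remainder) by a two-phase iteration with restructured helpers; objective: alternative.

-- structural bit-length helper (number of binary digits; 0 → 0), shared by both ports' lengths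
def pvBitsAux : Nat → Nat → Nat
  | 0, _ => 0
  | f + 1, n => if n = 0 then 0 else pvBitsAux f (n / 2) + 1

def pvBits (n : Nat) : Nat := pvBitsAux n n

-- ===== PORT A =====
def pvPoly : Nat := 0x11b        -- poly = int('0x11b',16)

def pvAddorminus (a1 a2 : Nat) : Nat := a1 ^^^ a2

def pvGmul (a poly : Nat) : Nat :=
  let a := a <<< 1
  let a := if a &&& 0x100 = 0x100 then a ^^^ poly else a
  a &&& 0xff

-- while a2 > 0: … ; a2 >>= 1   (a2 halves each step, so fuel a2+1 is never exhausted)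
def pvMultiplyLoop : Nat → Nat → Nat → Nat → Nat → Nat
  | 0, result, _, _, _ => result
  | f + 1, result, a1, a2, poly =>
    if a2 > 0 then
      pvMultiplyLoop f (if a2 &&& 1 = 1 then result ^^^ a1 else result) (pvGmul a1 poly) (a2 >>> 1) poly
    else result

def pvMultiply (a1 a2 poly : Nat) : Nat := pvMultiplyLoop (a2 + 1) 0 a1 a2 poly

def pvBitLen (n : Nat) : Nat := if n = 0 then 1 else pvBits n   -- len(bin(n)) - 2, n ≥ 0

-- while len1 >= len2: …  (each step strips a1's top bit, so fuel len1+1 is never exhausted)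
def pvDivideLoop : Nat → Nat → Nat → Nat → Nat → Nat → Nat
  | 0, _, _, _, _, div => div
  | f + 1, a1, a2, len1, len2, div =>
    if len1 ≥ len2 then
      let a1' := a1 ^^^ (a2 <<< (len1 - len2))
      let div' := div ^^^ (1 <<< (len1 - len2))
      pvDivideLoop f a1' a2 (pvBitLen a1') len2 div'
    else div

def pvDivide (a1 a2 : Nat) : Nat :=
  let len1 := pvBitLen a1
  let len2 := pvBitLen a2
  let len0 : Int := (len1 : Int) - (len2 : Int) + 1   -- can be negative, as in Python
  if len0 < 1 then 0
  else if len0 = (1 : Int) then 1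
  else if a2 = 1 then a1
  else pvDivideLoop (len1 + 1) a1 a2 len1 len2 0
  -- Python's trailing `return -1` is unreachable (the three len0 cases are exhaustive)

def pvRemainder (a1 a2 poly : Nat) : Nat :=
  let dv := pvDivide a1 a2
  if dv = 1 then pvAddorminus a1 a2
  else pvAddorminus a1 (pvMultiply a2 dv poly)

-- A's recursion, with fuel as a totality guard (fuel b+1 is never exhausted on Pre_,
-- since the remainder is strictly smaller than b there)
def pvGfeA : Nat → Nat → Nat → Nat × Nat × Nat
  | 0, a, _ => (a, 1, 0)
  | f + 1, a, b =>
    if b = 0 then (a, 1, 0)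
    else
      let r := pvGfeA f b (pvRemainder a b pvPoly)
      let g := r.1; let xt := r.2.1; let yt := r.2.2
      (g, yt, pvAddorminus xt (pvMultiply yt (pvDivide a b) pvPoly))

def GFexEuclid (a : Int) (b : Int) : Int × Int × Int :=
  let r := pvGfeA (b.toNat + 1) a.toNat b.toNat
  ((r.1 : Int), (r.2.1 : Int), (r.2.2 : Int))

-- ===== PORT B =====
-- _xtime: multiply by x in GF(2^8)
def pvXtime (a poly : Nat) : Nat :=
  let a := a <<< 1
  let a := if a &&& 0x100 ≠ 0 then a ^^^ poly else a
  a &&& 0xff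

-- _mul: GF(2^8) product, recursing on b's bits (fuel b+1; b halves each call)
def pvMulB : Nat → Nat → Nat → Nat → Nat
  | 0, _, _, _ => 0
  | f + 1, a, b, poly =>
    if b = 0 then 0
    else (if b &&& 1 = 1 then a else 0) ^^^ pvMulB f (pvXtime a poly) (b >>> 1) poly

-- _div: carry-less polynomial quotient, one uniform loop on bit lengths
-- (each step strips a's top bit, so fuel pvBits a + 1 is never exhausted)
def pvDivLoop : Nat → Nat → Nat → Nat → Nat
  | 0, q, _, _ => q
  | f + 1, q, a, b =>
    if pvBits b ≤ pvBits a then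
      let s := pvBits a - pvBits b
      pvDivLoop f (q ^^^ (1 <<< s)) (a ^^^ (b <<< s)) b
    else q

def pvDivB (a b : Nat) : Nat := pvDivLoop (pvBits a + 1) 0 a b

-- phase 1: while r1 != 0: q := _div(r0,r1); qs.append(q); r0, r1 = r1, r0 ^ _mul(r1,q,poly)
def pvPhase1 : Nat → Nat → Nat → List Nat → List Nat × Nat
  | 0, r0, _, qs => (qs, r0)
  | f + 1, r0, r1, qs =>
    if r1 = 0 then (qs, r0)
    else
      let q := pvDivB r0 r1
      pvPhase1 f r1 (r0 ^^^ pvMulB (q + 1) r1 q pvPoly) (qs ++ [q])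

-- phase 2 body: x, y = y, x ^ _mul(y, q, poly)
def pvStep (xy : Nat × Nat) (q : Nat) : Nat × Nat :=
  (xy.2, xy.1 ^^^ pvMulB (q + 1) xy.2 q pvPoly)

def GFexEuclid_alt (a : Int) (b : Int) : Int × Int × Int :=
  let p := pvPhase1 (b.toNat + 1) a.toNat b.toNat []
  let xy := p.1.reverse.foldl pvStep (1, 0)
  ((p.2 : Int), (xy.1 : Int), (xy.2 : Int))

-- ===== PRECONDITION & SPEC =====
-- Pre_ keeps the GF(2^8) field elements 0..255: outside this range the Python A hits
-- RecursionError or diverges on almost all inputs (remainder does not reduce arguments ≥ 256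
-- and negatives never reach 0); on the few such inputs where A still returns (e.g. (256,256))
-- B returns the same value.
def Pre_GFexEuclid (a : Int) (b : Int) : Prop := 0 ≤ a ∧ a ≤ 255 ∧ 0 ≤ b ∧ b ≤ 255
instance (a : Int) (b : Int) : Decidable (Pre_GFexEuclid a b) := by unfold Pre_GFexEuclid; infer_instance
def pvWitness_GFexEuclid : Int × Int := (7, 5)

-- On (0,1) A's divide(0,1) = 1 (len(bin(0)) counts 0 as one digit) makes A return the Bézout
-- triple (1,1,1); B returns the canonical (1,0,1); both satisfy 0·x ⊕ 1·y = 1 and B's is the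
-- standard extended-Euclid value.
def D_GFexEuclid (a : Int) (b : Int) : Prop := a = 0 ∧ b = 1
instance (a : Int) (b : Int) : Decidable (D_GFexEuclid a b) := by unfold D_GFexEuclid; infer_instance

def Spec_GFexEuclid (a : Int) (b : Int) (out : Int × Int × Int) : Prop := ¬ D_GFexEuclid a b → out = GFexEuclid_alt a b
instance (a : Int) (b : Int) (out : Int × Int × Int) : Decidable (Spec_GFexEuclid a b out) := by unfold Spec_GFexEuclid; infer_instance

def pvDiffWitness_GFexEuclid : Int × Int := (0, 1)
def pvDiffWitnessOut_GFexEuclid : (Int × Int × Int) × (Int × Int × Int) := ((1, 1, 1), (1, 0, 1))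

-- ===== CLAIM =====
def Claim_unchanged_GFexEuclid : Prop := ∀ (a : Int) (b : Int), Dom_GFexEuclid a b → Pre_GFexEuclid a b → Spec_GFexEuclid a b (GFexEuclid a b)
def Claim_changed_GFexEuclid : Prop := Dom_GFexEuclid (pvDiffWitness_GFexEuclid.1) (pvDiffWitness_GFexEuclid.2) ∧ Pre_GFexEuclid (pvDiffWitness_GFexEuclid.1) (pvDiffWitness_GFexEuclid.2) ∧ D_GFexEuclid (pvDiffWitness_GFexEuclid.1) (pvDiffWitness_GFexEuclid.2) ∧ GFexEuclid (pvDiffWitness_GFexEuclid.1) (pvDiffWitness_GFexEuclid.2) = pvDiffWitnessOut_GFexEuclid.1 ∧ GFexEuclid_alt (pvDiffWitness_GFexEuclid.1) (pvDiffWitness_GFexEuclid.2) = pvDiffWitnessOut_GFexEuclid.2 ∧ pvDiffWitnessOut_GFexEuclid.1 ≠ pvDiffWitnessOut_GFexEuclid.2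
def Claim_exact_GFexEuclid : Prop := ∀ (a : Int) (b : Int), Dom_GFexEuclid a b → Pre_GFexEuclid a b → D_GFexEuclid a b → GFexEuclid a b ≠ GFexEuclid_alt a b

-- ===== LEMMAS AND PROOFS =====

-- pvBits is Nat.size
theorem pv_size_rec (n : Nat) (h : n ≠ 0) : Nat.size n = Nat.size (n / 2) + 1 := by
  have h1 : n / 2 < 2 ^ Nat.size (n / 2) := Nat.lt_size_self _
  have hle : Nat.size n ≤ Nat.size (n / 2) + 1 := by
    rw [Nat.size_le, pow_succ]
    omega
  have hge : Nat.size (n / 2) + 1 ≤ Nat.size n := by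
    have hlt : Nat.size (n / 2) < Nat.size n := by
      rw [Nat.lt_size]
      by_cases hz : n / 2 = 0
      · rw [hz, Nat.size_zero, pow_zero]
        omega
      · have hs : 1 ≤ Nat.size (n / 2) := Nat.size_pos.mpr (Nat.pos_of_ne_zero hz)
        obtain ⟨t, ht⟩ : ∃ t, Nat.size (n / 2) = t + 1 := ⟨_, (Nat.succ_pred_eq_of_pos hs).symm⟩
        have h2 : 2 ^ t ≤ n / 2 := Nat.lt_size.mp (by omega)
        rw [ht, pow_succ]
        omega
    omega
  omega

theorem pvBitsAux_eq (f n : Nat) (h : n ≤ f) : pvBitsAux f n = Nat.size n := by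
  induction f generalizing n with
  | zero => interval_cases n; rfl
  | succ f ih =>
    by_cases hn : n = 0
    · simp [hn, pvBitsAux, Nat.size_zero]
    · rw [pvBitsAux, if_neg hn, ih (n / 2) (by omega), pv_size_rec n hn]

theorem pvBits_eq_size (n : Nat) : pvBits n = Nat.size n := pvBitsAux_eq n n le_rfl

-- y < 2^t when all bits ≥ t are clear
theorem pv_lt_two_pow_of_high_false (y t : Nat) (h : ∀ j, t ≤ j → y.testBit j = false) :
    y < 2 ^ t := by
  have hsr : y >>> t = 0 := by
    apply Nat.eq_of_testBit_eq
    intro i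
    rw [Nat.testBit_shiftRight, Nat.zero_testBit, h (t + i) (by omega)]
  rw [Nat.shiftRight_eq_div_pow] at hsr
  by_contra hlt
  have h2 : 2 ^ t ≤ y := by omega
  have := (Nat.one_le_div_iff (by positivity : (0:ℕ) < 2 ^ t)).mpr h2
  omega

-- clearing the top bit: 2^t ≤ x < 2^(t+1) → x ^^^ 2^t < 2^t
theorem pv_xor_top (t x : Nat) (h1 : 2 ^ t ≤ x) (h2 : x < 2 ^ (t + 1)) : x ^^^ 2 ^ t < 2 ^ t := by
  have hdiv : x >>> t = 1 := by
    rw [Nat.shiftRight_eq_div_pow]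
    have hp : (0:ℕ) < 2 ^ t := by positivity
    have hlo : 1 ≤ x / 2 ^ t := (Nat.one_le_div_iff hp).mpr h1
    have hhi : x / 2 ^ t < 2 := by
      rw [Nat.div_lt_iff_lt_mul hp]
      calc x < 2 ^ (t + 1) := h2
        _ = 2 * 2 ^ t := by ring
    omega
  have hbt : x.testBit t = true := by
    have hh : (x >>> t).testBit 0 = x.testBit (t + 0) := Nat.testBit_shiftRight ..
    rw [Nat.add_zero] at hh
    rw [← hh, hdiv]
    decide
  apply pv_lt_two_pow_of_high_false
  intro j hj
  rcases Nat.eq_or_lt_of_le hj with hj' | hj'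
  · rw [Nat.testBit_xor, ← hj', hbt, Nat.testBit_two_pow_self]
    rfl
  · rw [Nat.testBit_xor,
      Nat.testBit_eq_false_of_lt (lt_of_lt_of_le h2 (Nat.pow_le_pow_right (by norm_num) hj')),
      Nat.testBit_two_pow]
    simp
    omega

-- xor of two numbers of the same bit length drops below that length
theorem pv_xor_same_size (a b : Nat) (ha : a ≠ 0) (_hb : b ≠ 0) (hs : pvBits a = pvBits b) :
    a ^^^ b < 2 ^ (pvBits a - 1) := by
  rw [pvBits_eq_size a, pvBits_eq_size b] at hs
  rw [pvBits_eq_size a]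
  set t := Nat.size a - 1 with ht
  have hsa : 0 < Nat.size a := Nat.size_pos.mpr (Nat.pos_of_ne_zero ha)
  have h1a : 2 ^ t ≤ a := Nat.lt_size.mp (by omega)
  have h2a : a < 2 ^ (t + 1) := by
    have := Nat.lt_size_self a; rwa [show t + 1 = Nat.size a by omega]
  have h1b : 2 ^ t ≤ b := Nat.lt_size.mp (by rw [← hs]; omega)
  have h2b : b < 2 ^ (t + 1) := by
    have := Nat.lt_size_self b; rwa [show t + 1 = Nat.size b by rw [← hs]; omega]
  have := Nat.xor_lt_two_pow (pv_xor_top t a h1a h2a) (pv_xor_top t b h1b h2b)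
  calc a ^^^ b = (a ^^^ 2 ^ t) ^^^ (b ^^^ 2 ^ t) := by
        rw [Nat.xor_assoc, Nat.xor_comm b (2 ^ t), Nat.xor_xor_cancel_left]
    _ < 2 ^ t := this

-- basic pvBits facts
theorem pvBits_le (n k : Nat) : pvBits n ≤ k ↔ n < 2 ^ k := by
  rw [pvBits_eq_size]; exact Nat.size_le

theorem pvBits_lt_self (n : Nat) : n < 2 ^ pvBits n := by
  rw [pvBits_eq_size]; exact Nat.lt_size_self n

theorem pvBits_low (n : Nat) (h : n ≠ 0) : 2 ^ (pvBits n - 1) ≤ n := by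
  rw [pvBits_eq_size]
  have : 0 < Nat.size n := Nat.size_pos.mpr (Nat.pos_of_ne_zero h)
  exact Nat.lt_size.mp (by omega)

theorem pvBits_pos (n : Nat) (h : n ≠ 0) : 1 ≤ pvBits n := by
  rw [pvBits_eq_size]; exact Nat.size_pos.mpr (Nat.pos_of_ne_zero h)

theorem pvBits_two_le (n : Nat) (h : 2 ≤ n) : 2 ≤ pvBits n := by
  by_contra hc
  have : pvBits n ≤ 1 := by omega
  have := (pvBits_le n 1).mp this
  omega

theorem pvBits_one : pvBits 1 = 1 := rfl
theorem pvBits_zero : pvBits 0 = 0 := rfl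

-- B's xtime is A's gmul
theorem pv_xtime_eq (a p : Nat) : pvXtime a p = pvGmul a p := by
  simp only [pvXtime, pvGmul]
  generalize a <<< 1 = x
  have h := Nat.and_two_pow x 8
  rcases Bool.eq_false_or_eq_true (x.testBit 8) with hb | hb <;> rw [hb] at h <;>
    norm_num at h <;> simp [h]

-- A's accumulator multiply-loop equals B's direct recursion (any common fuel)
theorem pv_mul_eq (f : Nat) : ∀ (r a b p : Nat),
    pvMultiplyLoop f r a b p = r ^^^ pvMulB f a b p := by
  induction f with
  | zero => intro r a b p; simp [pvMultiplyLoop, pvMulB]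
  | succ f ih =>
    intro r a b p
    by_cases hb : b = 0
    · simp [pvMultiplyLoop, pvMulB, hb]
    · rw [pvMultiplyLoop, if_pos (Nat.pos_of_ne_zero hb), pvMulB, if_neg hb, ih, pv_xtime_eq]
      rcases Nat.mod_two_eq_zero_or_one b with h2 | h2 <;>
        simp [Nat.and_one_is_mod, h2, Nat.xor_assoc]

theorem pv_multiply_eq (a b p : Nat) : pvMultiply a b p = pvMulB (b + 1) a b p := by
  rw [pvMultiply, pv_mul_eq, Nat.zero_xor]

theorem pv_mulB_zero (f a p : Nat) : pvMulB f a 0 p = 0 := by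
  cases f <;> simp [pvMulB]

theorem pv_mulB_one (a p : Nat) : pvMulB 2 a 1 p = a := by
  simp [pvMulB]

-- A's divide loop (with its running length state) equals B's uniform loop, divisor ≥ 2 bits
theorem pv_divloop_eq (b : Nat) (hb : 2 ≤ pvBits b) (F : Nat) : ∀ (a q : Nat),
    pvDivideLoop F a b (pvBitLen a) (pvBits b) q = pvDivLoop F q a b := by
  induction F with
  | zero => intro a q; rfl
  | succ F ih =>
    intro a q
    by_cases ha : a = 0
    · rw [pvDivideLoop, pvDivLoop, if_neg (by simp [ha, pvBitLen]; omega),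
        if_neg (by simp [ha, pvBits_zero]; omega)]
    · rw [pvDivideLoop, pvDivLoop]
      have hl : pvBitLen a = pvBits a := by rw [pvBitLen, if_neg ha]
      rw [hl]
      by_cases hc : pvBits b ≤ pvBits a
      · rw [if_pos (by omega), if_pos hc, ih]
      · rw [if_neg (by omega), if_neg hc]

-- dividing by 1 returns the dividend
theorem pv_div_one (F : Nat) : ∀ (a q : Nat), pvBits a < F → pvDivLoop F q a 1 = q ^^^ a := by
  induction F with
  | zero => intro a q h; omega
  | succ F ih =>
    intro a q h
    by_cases ha : a = 0
    · rw [pvDivLoop, if_neg (by simp [ha, pvBits_zero, pvBits_one]), ha, Nat.xor_zero]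
    · have hpos := pvBits_pos a ha
      rw [pvDivLoop, if_pos (by rw [pvBits_one]; omega)]
      rw [pvBits_one]
      set t := pvBits a - 1 with hts
      have hsh : (1 : Nat) <<< t = 2 ^ t := by rw [Nat.shiftLeft_eq, Nat.one_mul]
      have ha2 : a ^^^ 1 <<< t < 2 ^ t := by
        rw [hsh]
        exact pv_xor_top t a (pvBits_low a ha)
          (by have := pvBits_lt_self a; rwa [show t + 1 = pvBits a by omega])
      have hbits : pvBits (a ^^^ 1 <<< t) ≤ t := (pvBits_le _ t).mpr ha2
      rw [ih _ _ (by omega)]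
      rw [Nat.xor_assoc, Nat.xor_comm (1 <<< t) (a ^^^ 1 <<< t), Nat.xor_assoc,
        Nat.xor_self, Nat.xor_zero]

-- the central helper equality: A's divide = B's div (both arguments nonzero)
theorem pv_div_eq (a b : Nat) (ha : a ≠ 0) (hb : b ≠ 0) : pvDivide a b = pvDivB a b := by
  have hla : pvBitLen a = pvBits a := by rw [pvBitLen, if_neg ha]
  have hlb : pvBitLen b = pvBits b := by rw [pvBitLen, if_neg hb]
  have hpa := pvBits_pos a ha
  have hpb := pvBits_pos b hb
  rw [pvDivide, hla, hlb, pvDivB]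
  by_cases h1 : pvBits a < pvBits b
  · -- dividend shorter: quotient 0, loop does not run
    rw [if_pos (by omega), pvDivLoop, if_neg (by omega)]
  · by_cases h2 : pvBits a = pvBits b
    · -- equal lengths: quotient 1, loop runs exactly once
      rw [if_neg (by omega), if_pos (by omega)]
      obtain ⟨k, hk⟩ : ∃ k, pvBits a = k + 1 := ⟨pvBits a - 1, by omega⟩
      rw [pvDivLoop, if_pos (by omega)]
      have hs : pvBits a - pvBits b = 0 := by omega
      rw [hs]
      show (1 : Nat) = pvDivLoop (pvBits a) (0 ^^^ 1 <<< 0) (a ^^^ b <<< 0) b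
      rw [Nat.shiftLeft_zero, Nat.shiftLeft_zero, Nat.zero_xor]
      have hx := pv_xor_same_size a b ha hb h2
      have hbx : pvBits (a ^^^ b) ≤ pvBits a - 1 := (pvBits_le _ _).mpr hx
      rw [hk, pvDivLoop, if_neg (by omega)]
    · -- strictly longer dividend
      have h3 : pvBits b < pvBits a := by omega
      rw [if_neg (by omega), if_neg (by omega)]
      by_cases hb1 : b = 1
      · rw [if_pos hb1, hb1, pv_div_one _ _ _ (by omega), Nat.zero_xor]
      · rw [if_neg hb1]
        have hb2 : 2 ≤ pvBits b := pvBits_two_le b (by omega)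
        rw [← hla, pv_divloop_eq b hb2, hla]

-- A's remainder is B's inline r0 ^ mul(r1, q)
theorem pv_rem_eq (a b : Nat) (ha : a ≠ 0) (hb : b ≠ 0) :
    pvRemainder a b pvPoly = a ^^^ pvMulB (pvDivB a b + 1) b (pvDivB a b) pvPoly := by
  rw [pvRemainder, pv_div_eq a b ha hb]
  by_cases h1 : pvDivB a b = 1
  · rw [if_pos h1, h1, pv_mulB_one, pvAddorminus]
  · rw [if_neg h1, pvAddorminus, pv_multiply_eq]

-- phase 1 only ever appends to the accumulator
theorem pvPhase1_acc (f : Nat) : ∀ (r0 r1 : Nat) (qs : List Nat),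
    pvPhase1 f r0 r1 qs = (qs ++ (pvPhase1 f r0 r1 []).1, (pvPhase1 f r0 r1 []).2) := by
  induction f with
  | zero => intro r0 r1 qs; simp [pvPhase1]
  | succ f ih =>
    intro r0 r1 qs
    by_cases h : r1 = 0
    · simp [pvPhase1, h]
    · simp only [pvPhase1, if_neg h]
      rw [ih r1 _ (qs ++ [pvDivB r0 r1]), ih r1 _ ([] ++ [pvDivB r0 r1])]
      simp

-- A's recursion equals B's two-phase iteration whenever the leading argument is nonzero
theorem pv_main (f : Nat) : ∀ (a b : Nat), a ≠ 0 →
    pvGfeA f a b =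
      (let p := pvPhase1 f a b []
       let xy := p.1.reverse.foldl pvStep (1, 0)
       (p.2, xy.1, xy.2)) := by
  induction f with
  | zero => intro a b _; simp [pvGfeA, pvPhase1]
  | succ f ih =>
    intro a b ha
    by_cases hb : b = 0
    · simp [pvGfeA, pvPhase1, hb]
    · simp only [pvGfeA, pvPhase1, if_neg hb]
      rw [pv_rem_eq a b ha hb,
          ih b (a ^^^ pvMulB (pvDivB a b + 1) b (pvDivB a b) pvPoly) hb,
          pvPhase1_acc f b _ ([] ++ [pvDivB a b])]
      simp only [List.nil_append, List.reverse_append, List.reverse_cons, List.reverse_nil,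
        List.foldl_append, List.foldl_cons, List.foldl_nil]
      rw [pv_div_eq a b ha hb, pv_multiply_eq, pvAddorminus]
      rfl

-- evaluation of both sides when the first argument is 0 and the second is ≥ 2
theorem pv_zero_case (m : Nat) (hm : 2 ≤ m) :
    pvGfeA (m + 1) 0 m =
      (let p := pvPhase1 (m + 1) 0 m []
       let xy := p.1.reverse.foldl pvStep (1, 0)
       (p.2, xy.1, xy.2)) := by
  have hm0 : m ≠ 0 := by omega
  have hdiv : pvDivide 0 m = 0 := by
    rw [pvDivide]
    have h2 : 2 ≤ pvBits m := pvBits_two_le m hm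
    rw [if_pos (by simp [pvBitLen, if_neg hm0]; omega)]
  have hdivB : pvDivB 0 m = 0 := by
    have h1 := pvBits_pos m hm0
    rw [pvDivB, pvBits_zero, pvDivLoop, if_neg (by rw [pvBits_zero]; omega)]
  have hrem : pvRemainder 0 m pvPoly = 0 := by
    rw [pvRemainder, hdiv, if_neg (by norm_num)]
    simp [pvMultiply, pvMultiplyLoop, pvAddorminus]
  obtain ⟨k, hk⟩ : ∃ k, m = k + 1 := ⟨m - 1, by omega⟩
  have hA : pvGfeA (m + 1) 0 m = (m, 0, 1) := by
    rw [pvGfeA, if_neg hm0, hrem]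
    rw [show pvGfeA m m 0 = (m, 1, 0) by rw [hk]; rfl]
    simp [pvAddorminus, hdiv, pvMultiply, pvMultiplyLoop]
  have hph : pvPhase1 (m + 1) 0 m [] = ([0], m) := by
    rw [pvPhase1, if_neg hm0]
    show pvPhase1 m m (0 ^^^ pvMulB (pvDivB 0 m + 1) m (pvDivB 0 m) pvPoly)
        ([] ++ [pvDivB 0 m]) = ([0], m)
    rw [hdivB, pv_mulB_zero, Nat.xor_zero, List.nil_append]
    rw [hk]
    rfl
  rw [hA]
  simp [hph, pvStep, pv_mulB_zero]

-- ===== VERDICT =====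
theorem GFexEuclid_spec : Claim_unchanged_GFexEuclid := by
  intro a b _ hpre hD
  obtain ⟨ha0, ha1, hb0, hb1⟩ := hpre
  unfold GFexEuclid GFexEuclid_alt
  by_cases hbz : b.toNat = 0
  · rw [hbz]; rfl
  · by_cases haz : a.toNat = 0
    · have hb1' : b.toNat ≠ 1 := by
        intro h; exact hD ⟨by omega, by omega⟩
      rw [haz, pv_zero_case b.toNat (by omega)]
    · rw [pv_main (b.toNat + 1) a.toNat b.toNat haz]

theorem GFexEuclid_changed : Claim_changed_GFexEuclid := by
  unfold Claim_changed_GFexEuclid; decide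

theorem GFexEuclid_tight : Claim_exact_GFexEuclid := by
  intro a b _ _ hD
  obtain ⟨h1, h2⟩ := hD
  subst h1; subst h2
  decide
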